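-- pv_equiv track=rewrite | github.com/9minseok/Algorithm | 20230217/고대유적.py | count
-- ===== SOURCE A (Python) =====
-- def count(arr):
--     maxV = 2
--     for li in arr:
--         cnt = 0
--         for a in li:
--             if a == 1:
--                 cnt += 1
--                 if maxV < cnt:
--                     maxV = cnt
--             else:
--                 cnt = 0
--     return maxV
-- ===== SOURCE B (Python) =====
-- def _one_runs(li):
--     """Lengths of the maximal runs of consecutive 1s in li."""
--     runs = []
--     i = 0
--     n = len(li)
--     while i < n:
--         if li[i] == 1:
--             j = i + 1
--             while j < n and li[j] == 1:
--                 j += 1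
--             runs.append(j - i)
--             i = j
--         else:
--             i += 1
--     return runs
--
-- def count(arr):
--     best = 2
--     for li in arr:
--         for r in _one_runs(li):
--             best = max(best, r)
--     return best
-- ===== Notes on version B (the rewrite author's own statement) =====
-- stated objective: alternative
-- what changed: B first decomposes each row into the lengths of its maximal runs of 1s (group-then-measure) and takes the maximum of those lengths seeded at 2, instead of A's single inline counter with a reset branch and in-place maximum update.
import Mathlib
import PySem

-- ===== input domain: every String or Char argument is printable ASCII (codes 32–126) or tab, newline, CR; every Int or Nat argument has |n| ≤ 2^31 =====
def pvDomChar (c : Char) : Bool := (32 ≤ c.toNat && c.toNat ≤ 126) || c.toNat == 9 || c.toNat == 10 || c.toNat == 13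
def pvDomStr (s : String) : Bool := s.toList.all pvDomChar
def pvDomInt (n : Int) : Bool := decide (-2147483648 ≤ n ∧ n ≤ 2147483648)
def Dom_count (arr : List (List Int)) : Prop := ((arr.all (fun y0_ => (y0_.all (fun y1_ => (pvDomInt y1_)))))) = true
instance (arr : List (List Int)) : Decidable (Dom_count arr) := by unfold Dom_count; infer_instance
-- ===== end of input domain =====

-- B decomposes each row into maximal runs of 1s and maximizes their lengths (seed 2);
-- A keeps an inline counter with a reset branch. Alternative decomposition, same cost.


-- ===== PORT A =====
-- literal transliteration of A: nested fold carrying (maxV, cnt)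
def count (arr : List (List Int)) : Int :=
  arr.foldl (fun maxV li =>
    (li.foldl (fun (s : Int × Int) a =>
        if a = 1 then
          let cnt := s.2 + 1
          (if s.1 < cnt then cnt else s.1, cnt)
        else (s.1, 0)) (maxV, 0)).1) 2

-- ===== PORT B =====
-- lengths of the maximal runs of 1s in a row (Source B's _one_runs: the inner
-- 'while j < n and li[j] == 1' scan becomes takeWhile/dropWhile)
def onesRuns : List Int → List Int
  | [] => []
  | a :: rest =>
    if a = 1 then
      (1 + ((rest.takeWhile (fun x => x == 1)).length : Int)) ::
        onesRuns (rest.dropWhile (fun x => x == 1))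
    else
      onesRuns rest
  termination_by li => li.length
  decreasing_by
  · exact Nat.lt_succ_of_le (List.length_dropWhile_le _ _)
  · exact Nat.lt_succ_self _

def count_alt (arr : List (List Int)) : Int :=
  arr.foldl (fun best li => (onesRuns li).foldl max best) 2

-- ===== PRECONDITION & SPEC =====
def Spec_count (arr : List (List Int)) (out : Int) : Prop := out = count_alt arr
instance (arr : List (List Int)) (out : Int) : Decidable (Spec_count arr out) := by unfold Spec_count; infer_instance

-- ===== CLAIM (what is proved, stated in full; the proofs are below) =====
def Claim_equal_count : Prop := ∀ (arr : List (List Int)), Dom_count arr → Spec_count arr (count arr)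

-- ===== LEMMAS AND PROOFS =====

-- maximum run length of 1s, with c the length of the run currently open
def maxRun (c : Int) : List Int → Int
  | [] => c
  | a :: rest => if a = 1 then maxRun (c + 1) rest else max c (maxRun 0 rest)

theorem le_maxRun (li : List Int) : ∀ c : Int, c ≤ maxRun c li := by
  induction li with
  | nil => intro c; simp [maxRun]
  | cons a rest ih =>
    intro c
    simp only [maxRun]
    split
    · exact le_trans (by omega) (ih (c + 1))
    · exact le_max_left _ _

theorem maxRun_reset (k : Int) (d : List Int) (hk : 0 ≤ k)
    (hhd : d.head?.all (fun b => !(b == 1)) = true) :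
    maxRun k d = max k (maxRun 0 d) := by
  cases d with
  | nil => simp [maxRun]; omega
  | cons b d' =>
    have hb' : b ≠ 1 := by simpa using hhd
    simp only [maxRun, if_neg hb']
    have := le_maxRun d' (0 : Int)
    omega

theorem innerA_eq (li : List Int) : ∀ m c : Int, 0 ≤ c → c ≤ m →
    (li.foldl (fun (s : Int × Int) a =>
        if a = 1 then
          let cnt := s.2 + 1
          (if s.1 < cnt then cnt else s.1, cnt)
        else (s.1, 0)) (m, c)).1 = max m (maxRun c li) := by
  induction li with
  | nil => intro m c _ hcm; simp [maxRun]; omega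
  | cons a rest ih =>
    intro m c hc hcm
    simp only [List.foldl_cons, maxRun]
    by_cases ha : a = 1
    · simp only [ha, if_true]
      have h1 : (if m < c + 1 then c + 1 else m) = max m (c + 1) := by omega
      rw [h1, ih (max m (c + 1)) (c + 1) (by omega) (le_max_right _ _)]
      have h2 := le_maxRun rest (c + 1)
      omega
    · simp only [if_neg ha]
      rw [ih m 0 le_rfl (by omega)]
      have h2 := le_maxRun rest (0 : Int)
      omega

theorem maxRun_ones_append (t : List Int) : ∀ (c : Int) (d : List Int),
    (∀ x ∈ t, x = 1) → maxRun c (t ++ d) = maxRun (c + t.length) d := by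
  induction t with
  | nil => intro c d _; simp
  | cons a t' ih =>
    intro c d ht
    have ha : a = 1 := ht a (by simp)
    subst ha
    simp only [List.cons_append, maxRun, if_true]
    rw [ih (c + 1) d (fun x hx => ht x (by simp [hx]))]
    have hlen : (c + (((1 : Int) :: t').length : Int)) = c + 1 + (t'.length : Int) := by
      simp only [List.length_cons]; push_cast; ring
    rw [hlen]

theorem runs_eq (li : List Int) : ∀ m : Int, 0 ≤ m →
    (onesRuns li).foldl max m = max m (maxRun 0 li) := by
  induction li using onesRuns.induct with
  | case1 => intro m hm; simp [onesRuns, maxRun]; omega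
  | case2 rest ih =>
    intro m hm
    set t := rest.takeWhile (fun x => x == 1) with ht
    set d := rest.dropWhile (fun x => x == 1) with hd
    have hsplit : rest = t ++ d := (List.takeWhile_append_dropWhile).symm
    have hones : ∀ x ∈ t, x = 1 := by
      intro x hx
      have := List.mem_takeWhile_imp hx
      simpa using this
    simp only [onesRuns, if_true, List.foldl_cons]
    rw [ih (max m (1 + (t.length : Int))) (by positivity)]
    have h0 : maxRun 0 ((1 : Int) :: rest) = maxRun (1 + (t.length : Int)) d := by
      simp only [maxRun, if_true]
      calc maxRun (0 + 1) rest = maxRun 1 (t ++ d) := by rw [← hsplit]; norm_num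
        _ = maxRun (1 + (t.length : Int)) d := maxRun_ones_append t 1 d hones
    rw [h0]
    -- maxRun (1 + t.length) d = max (1 + t.length) (maxRun 0 d)
    have hk : (0 : Int) ≤ 1 + (t.length : Int) := by positivity
    have hhd : d.head?.all (fun b => !(b == 1)) = true := by
      have h := List.head?_dropWhile_not (fun x => x == 1) rest
      rw [← hd] at h
      cases hc : d.head? with
      | none => simp
      | some b => rw [hc] at h; simpa using h
    rw [maxRun_reset (1 + (t.length : Int)) d (by positivity) hhd]
    have h1 := le_maxRun d (0 : Int)
    omega
  | case3 a rest ha ih =>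
    intro m hm
    have ha' : a ≠ 1 := by simpa using ha
    simp only [onesRuns, if_neg ha', maxRun]
    rw [ih m hm]
    have := le_maxRun rest (0 : Int)
    omega

theorem outer_eq (arr : List (List Int)) : ∀ m : Int, 0 ≤ m →
    arr.foldl (fun maxV li =>
      (li.foldl (fun (s : Int × Int) a =>
          if a = 1 then
            let cnt := s.2 + 1
            (if s.1 < cnt then cnt else s.1, cnt)
          else (s.1, 0)) (maxV, 0)).1) m
    = arr.foldl (fun best li => (onesRuns li).foldl max best) m := by
  induction arr with
  | nil => intro m _; rfl
  | cons li arr' ih =>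
    intro m hm
    simp only [List.foldl_cons]
    rw [innerA_eq li m 0 le_rfl hm, ← runs_eq li m hm]
    have hrow : (0 : Int) ≤ (onesRuns li).foldl max m := by
      rw [runs_eq li m hm]; have := le_maxRun li (0 : Int); omega
    exact ih _ hrow

-- ===== VERDICT (by name: the statement is the Claim_ definition above) =====
theorem count_spec : Claim_equal_count := by
  intro arr _
  unfold Spec_count count count_alt
  exact outer_eq arr 2 (by norm_num)
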